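-- pv_equiv track=rewrite | github.com/AyeshaAli05/CogAlg | frame_dblobs.py | lateral_comp
-- ===== SOURCE A (Python) =====
-- from collections import deque
--
-- def lateral_comp(pixel_):  # comparison over x coordinate: between min_rng of consecutive pixels within each line
--
--     ders1_ = []  # tuples of complete 1D derivatives: summation range = rng
--     rng_ders1_ = deque(maxlen=rng)  # array of ders1 within rng from input pixel: summation range < rng
--     max_index = rng - 1  # max index of rng_ders1_
--     pri_d, pri_m = 0, 0  # fuzzy derivatives in prior completed tuple
--
--     for p in pixel_:  # pixel p is compared to rng of prior pixels within horizontal line, summing d and m per prior pixel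
--         for index, (pri_p, d, m) in enumerate(rng_ders1_):
--
--             d += p - pri_p  # fuzzy d: running sum of differences between pixel and all subsequent pixels within rng
--             m += min(p, pri_p)  # fuzzy m: running sum of matches between pixel and all subsequent pixels within rng
--
--             if index < max_index:
--                 rng_ders1_[index] = (pri_p, d, m)
--             else:
--                 ders1_.append((pri_p, d + pri_d, m + pri_m))  # completed bilateral tuple is transferred from rng_ders_ to ders_
--                 pri_d = d; pri_m = m  # to complement derivatives of next rng_t_: derived from next rng of pixels
--
--         rng_ders1_.appendleft((p, 0, 0))  # new tuple with initialized d and m, maxlen displaces completed tuple from rng_t_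
--
--     ders1_ += reversed(rng_ders1_)  # or tuples of last rng (incomplete, in reverse order) are discarded?
--     return ders1_
--
-- rng = 2  # number of leftward or upward pixels compared to each input pixel
-- ===== SOURCE B (Python) =====
-- def lateral_comp(pixel_):  # one pass over indices: closed-form forward sums with bilateral carry, then the incomplete tail
--     n = len(pixel_)
--     out = []
--     prev_d = prev_m = 0
--     for j in range(n - 2):
--         p = pixel_[j]
--         fd = (pixel_[j + 1] - p) + (pixel_[j + 2] - p)
--         fm = min(pixel_[j + 1], p) + min(pixel_[j + 2], p)
--         out.append((p, fd + prev_d, fm + prev_m))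
--         prev_d, prev_m = fd, fm
--     if n >= 2:
--         p = pixel_[n - 2]
--         out.append((p, pixel_[n - 1] - p, min(pixel_[n - 1], p)))
--     if n >= 1:
--         out.append((pixel_[n - 1], 0, 0))
--     return out
-- ===== Notes on version B (the rewrite author's own statement) =====
-- stated objective: simpler
-- what changed: Replaces A's rolling deque of partially-summed tuples (mutated in place by an inner enumerate loop) with closed-form per-pixel forward sums plus a bilateral carry in a single index loop, followed by an explicit two-tuple tail.
import Mathlib
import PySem

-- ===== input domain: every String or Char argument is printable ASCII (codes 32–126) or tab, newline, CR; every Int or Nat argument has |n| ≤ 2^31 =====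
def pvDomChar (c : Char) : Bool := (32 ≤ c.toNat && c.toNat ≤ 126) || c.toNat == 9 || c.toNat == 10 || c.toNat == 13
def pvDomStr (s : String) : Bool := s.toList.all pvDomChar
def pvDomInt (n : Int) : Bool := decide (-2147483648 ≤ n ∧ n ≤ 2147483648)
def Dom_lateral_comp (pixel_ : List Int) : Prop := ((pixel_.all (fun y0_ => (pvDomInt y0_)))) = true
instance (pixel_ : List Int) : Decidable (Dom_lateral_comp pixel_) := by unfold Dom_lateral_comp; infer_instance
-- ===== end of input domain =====

-- B replaces A's rolling deque of partial tuples by closed-form per-pixel forward sums with a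
-- bilateral carry and an explicit two-tuple tail (objective: simpler, same O(n)).

-- ===== PORT A =====
-- loop body of A's `for p in pixel_`: state = (ders1_, rng_ders1_, pri_d, pri_m)
def lcStepA (st : List (Int × Int × Int) × List (Int × Int × Int) × Int × Int) (p : Int) :
    List (Int × Int × Int) × List (Int × Int × Int) × Int × Int :=
  let rng : Nat := 2
  let maxIndex : Int := (rng : Int) - 1
  -- inner `for index, (pri_p, d, m) in enumerate(rng_ders1_)` (only indices < current are written,
  -- so iterating the snapshot is exact)
  let inner := (PySem.List.enumerate st.2.1).foldl
    (fun (acc : List (Int × Int × Int) × List (Int × Int × Int) × Int × Int)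
         (ix : Int × (Int × Int × Int)) =>
      let index := ix.1
      let pri_p := ix.2.1
      let d := ix.2.2.1 + (p - pri_p)
      let m := ix.2.2.2 + min p pri_p
      if index < maxIndex then
        (acc.1, acc.2.1.set index.toNat (pri_p, d, m), acc.2.2.1, acc.2.2.2)
      else
        (acc.1 ++ [(pri_p, d + acc.2.2.1, m + acc.2.2.2)], acc.2.1, d, m))
    (st.1, st.2.1, st.2.2.1, st.2.2.2)
  -- appendleft on a deque with maxlen = rng displaces the rightmost element
  (inner.1, ((p, (0:Int), (0:Int)) :: inner.2.1).take rng, inner.2.2.1, inner.2.2.2)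

def lateral_comp (pixel_ : List Int) : List (Int × Int × Int) :=
  let final := pixel_.foldl lcStepA ([], [], 0, 0)
  final.1 ++ final.2.1.reverse   -- ders1_ += reversed(rng_ders1_)

-- ===== PORT B =====
-- loop body of B's `for j in range(n - 2)`: state = (out, prev_d, prev_m)
def lcStepB (pixel_ : List Int) (acc : List (Int × Int × Int) × Int × Int) (j : Nat) :
    List (Int × Int × Int) × Int × Int :=
  let p := pixel_.getD j 0
  let fd := (pixel_.getD (j+1) 0 - p) + (pixel_.getD (j+2) 0 - p)
  let fm := min (pixel_.getD (j+1) 0) p + min (pixel_.getD (j+2) 0) p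
  (acc.1 ++ [(p, fd + acc.2.1, fm + acc.2.2)], fd, fm)

def lateral_comp_alt (pixel_ : List Int) : List (Int × Int × Int) :=
  let n := pixel_.length
  let main := (List.range (n - 2)).foldl (lcStepB pixel_) ([], 0, 0)
  let tail2 :=
    if 2 ≤ n then
      let p := pixel_.getD (n-2) 0
      let q := pixel_.getD (n-1) 0
      [(p, q - p, min q p)]
    else []
  let tail1 := if 1 ≤ n then [(pixel_.getD (n-1) 0, 0, 0)] else []
  main.1 ++ tail2 ++ tail1

-- ===== PRECONDITION & SPEC =====
def Spec_lateral_comp (pixel_ : List Int) (out : List (Int × Int × Int)) : Prop := out = lateral_comp_alt pixel_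
instance (pixel_ : List Int) (out : List (Int × Int × Int)) : Decidable (Spec_lateral_comp pixel_ out) := by unfold Spec_lateral_comp; infer_instance

-- ===== CLAIM (what is proved, stated in full; the proofs are below) =====
def Claim_equal_lateral_comp : Prop := ∀ (pixel_ : List Int), Dom_lateral_comp pixel_ → Spec_lateral_comp pixel_ (lateral_comp pixel_)

-- ===== LEMMAS AND PROOFS =====

-- common shape of both outputs once two pixels a, b have been seen, with carries pd, pm
def pvCore : Int → Int → Int → Int → List Int → List (Int × Int × Int)
  | a, b, _, _, [] => [(a, b - a, min b a), (b, 0, 0)]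
  | a, b, pd, pm, c :: t =>
      (a, ((b - a) + (c - a)) + pd, (min b a + min c a) + pm) ::
        pvCore b c ((b - a) + (c - a)) (min b a + min c a) t

lemma Afold (xs : List Int) : ∀ (a b pd pm : Int) (ders : List (Int × Int × Int)),
    (xs.foldl lcStepA (ders, [(b, 0, 0), (a, b - a, min b a)], pd, pm)).1
      ++ (xs.foldl lcStepA (ders, [(b, 0, 0), (a, b - a, min b a)], pd, pm)).2.1.reverse
    = ders ++ pvCore a b pd pm xs := by
  induction xs with
  | nil => intro a b pd pm ders; simp [pvCore]
  | cons c t ih =>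
      intro a b pd pm ders
      have h : lcStepA (ders, [(b, 0, 0), (a, b - a, min b a)], pd, pm) c
          = (ders ++ [(a, ((b - a) + (c - a)) + pd, (min b a + min c a) + pm)],
             [(c, 0, 0), (b, c - b, min c b)],
             (b - a) + (c - a), min b a + min c a) := by
        simp [lcStepA, PySem.List.enumerate_cons, PySem.List.enumerate_nil]
      simp only [List.foldl_cons, h, ih]
      simp [pvCore]
  
lemma Bshift (a : Int) (l : List Int) (acc : List (Int × Int × Int) × Int × Int) (j : Nat) :
    lcStepB (a :: l) acc (j + 1) = lcStepB l acc j := by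
  simp [lcStepB]

lemma Bfold (xs : List Int) : ∀ (a b pd pm : Int) (out : List (Int × Int × Int)),
    ((List.range xs.length).foldl (lcStepB (a :: b :: xs)) (out, pd, pm)).1
      ++ [((a :: b :: xs).getD xs.length 0,
           (a :: b :: xs).getD (xs.length + 1) 0 - (a :: b :: xs).getD xs.length 0,
           min ((a :: b :: xs).getD (xs.length + 1) 0) ((a :: b :: xs).getD xs.length 0)),
          ((a :: b :: xs).getD (xs.length + 1) 0, 0, 0)]
    = out ++ pvCore a b pd pm xs := by
  induction xs with
  | nil => intro a b pd pm out; simp [pvCore]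
  | cons c t ih =>
      intro a b pd pm out
      have h0 : lcStepB (a :: b :: c :: t) (out, pd, pm) 0
          = (out ++ [(a, ((b - a) + (c - a)) + pd, (min b a + min c a) + pm)],
             (b - a) + (c - a), min b a + min c a) := by
        simp [lcStepB]
      rw [List.length_cons, List.range_succ_eq_map, List.foldl_cons, h0, List.foldl_map]
      simp only [Nat.succ_eq_add_one, Bshift]
      have := ih b c ((b - a) + (c - a)) (min b a + min c a)
        (out ++ [(a, ((b - a) + (c - a)) + pd, (min b a + min c a) + pm)])
      simp only [List.getD_cons_succ] at this ⊢
      rw [this]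
      simp [pvCore]

lemma A_eq_core (a b : Int) (xs : List Int) :
    lateral_comp (a :: b :: xs) = pvCore a b 0 0 xs := by
  have h1 : lcStepA ([], [], 0, 0) a = ([], [(a, 0, 0)], 0, 0) := by
    simp [lcStepA, PySem.List.enumerate_nil]
  have h2 : lcStepA ([], [(a, 0, 0)], 0, 0) b
      = ([], [(b, 0, 0), (a, b - a, min b a)], 0, 0) := by
    simp [lcStepA, PySem.List.enumerate_cons, PySem.List.enumerate_nil]
  show ((a :: b :: xs).foldl lcStepA ([], [], 0, 0)).1
      ++ ((a :: b :: xs).foldl lcStepA ([], [], 0, 0)).2.1.reverse = _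
  rw [List.foldl_cons, h1, List.foldl_cons, h2]
  simpa using Afold xs a b 0 0 []

lemma B_eq_core (a b : Int) (xs : List Int) :
    lateral_comp_alt (a :: b :: xs) = pvCore a b 0 0 xs := by
  show ((List.range ((a :: b :: xs).length - 2)).foldl (lcStepB (a :: b :: xs)) ([], 0, 0)).1
      ++ _ ++ _ = _
  have hn : (a :: b :: xs).length - 2 = xs.length := by simp
  rw [hn]
  have h2 : (2 ≤ (a :: b :: xs).length) := by simp
  have h1 : (1 ≤ (a :: b :: xs).length) := by simp
  simp only [if_pos h2, if_pos h1]
  have hm1 : (a :: b :: xs).length - 1 = xs.length + 1 := by simp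
  rw [hm1, List.append_assoc]
  exact Bfold xs a b 0 0 []

-- ===== VERDICT (by name: the statement is the Claim_ definition above) =====
theorem lateral_comp_spec : Claim_equal_lateral_comp := by
  intro pixel_ _
  unfold Spec_lateral_comp
  match pixel_ with
  | [] => rfl
  | [a] => rfl
  | a :: b :: xs => rw [A_eq_core, B_eq_core]
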